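-- pv_equiv track=rewrite | github.com/Nonary/ghcp_proxy | tools/analyze_prompt_shifts.py | first_diff_offset
-- ===== SOURCE A (Python) =====
-- def first_diff_offset(left: str, right: str) -> int | None:
--     limit = min(len(left), len(right))
--     for idx in range(limit):
--         if left[idx] != right[idx]:
--             return idx
--     if len(left) == len(right):
--         return None
--     return limit
-- ===== SOURCE B (Python) =====
-- def first_diff_offset(left: str, right: str) -> int | None:
--     # Binary search for the longest common prefix length: slice equality is
--     # monotone in the prefix length, so bisect on it instead of scanning.
--     lo, hi = 0, min(len(left), len(right))
--     while lo < hi: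
--         mid = (lo + hi + 1) // 2
--         if left[:mid] == right[:mid]:
--             lo = mid
--         else:
--             hi = mid - 1
--     if lo == len(left) == len(right):
--         return None
--     return lo
-- ===== Notes on version B (the rewrite author's own statement) =====
-- stated objective: alternative
-- what changed: Replaced the indexed early-return character scan with a binary search on the common-prefix length using whole-slice equality tests (a monotone predicate), then a single branch on that length.
import Mathlib
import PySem

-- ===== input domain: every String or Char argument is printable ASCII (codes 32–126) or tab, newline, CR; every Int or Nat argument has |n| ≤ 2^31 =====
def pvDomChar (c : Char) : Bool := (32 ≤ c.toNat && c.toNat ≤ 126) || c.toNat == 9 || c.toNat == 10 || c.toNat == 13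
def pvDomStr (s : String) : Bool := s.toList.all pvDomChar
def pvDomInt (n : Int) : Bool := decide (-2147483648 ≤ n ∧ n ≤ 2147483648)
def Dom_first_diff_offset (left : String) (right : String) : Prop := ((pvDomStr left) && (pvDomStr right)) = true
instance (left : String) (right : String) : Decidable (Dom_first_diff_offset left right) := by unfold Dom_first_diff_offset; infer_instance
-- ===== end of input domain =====

-- B replaces A's indexed early-return scan by a binary search on the common-prefix length (slice-equality is monotone); same result, a different algorithm, not faster.

-- ===== PORT A =====
-- the 'for idx in range(limit): if left[idx] != right[idx]: return idx' loop, early return as recursion over the range list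
def pvAScan (l r : List Char) : List Int → Option Int
  | [] => none
  | i :: rest =>
    if PySem.List.pyGet? l i ≠ PySem.List.pyGet? r i then some i else pvAScan l r rest

def first_diff_offset (left : String) (right : String) : Option Int :=
  let l := left.toList
  let r := right.toList
  let limit : Int := min l.length r.length
  match pvAScan l r (PySem.List.pyRange 0 limit 1) with
  | some i => some i
  | none => if l.length = r.length then none else some limit

-- ===== PORT B =====
-- midpoint bound needed by the loop's termination (cited in decreasing_by)
theorem pvMidBounds (lo hi : Int) (h : lo < hi) :
    lo + 1 ≤ PySem.Int.floordiv (lo + hi + 1) 2 ∧ PySem.Int.floordiv (lo + hi + 1) 2 ≤ hi := by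
  rw [PySem.Int.floordiv_eq_ediv_of_pos (by omega)]
  omega

-- the 'while lo < hi: mid = (lo+hi+1)//2; if left[:mid]==right[:mid]: lo = mid else hi = mid-1' loop
def pvBSearch (left right : String) (lo hi : Int) : Int :=
  if h : lo < hi then
    let mid := PySem.Int.floordiv (lo + hi + 1) 2
    if PySem.Str.slice left none (some mid) = PySem.Str.slice right none (some mid) then
      pvBSearch left right mid hi
    else
      pvBSearch left right lo (mid - 1)
  else lo
termination_by (hi - lo).toNat
decreasing_by
· have := pvMidBounds lo hi h; omega
· have := pvMidBounds lo hi h; omega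

def first_diff_offset_alt (left : String) (right : String) : Option Int :=
  let lo := pvBSearch left right 0 (min left.toList.length right.toList.length : Nat)
  if lo = (left.toList.length : Int) ∧ left.toList.length = right.toList.length then none
  else some lo

-- ===== PRECONDITION & SPEC =====
def Spec_first_diff_offset (left : String) (right : String) (out : Option Int) : Prop := out = first_diff_offset_alt left right
instance (left : String) (right : String) (out : Option Int) : Decidable (Spec_first_diff_offset left right out) := by unfold Spec_first_diff_offset; infer_instance

-- ===== CLAIM (what is proved, stated in full; the proofs are below) =====
def Claim_equal_first_diff_offset : Prop := ∀ (left : String) (right : String), Dom_first_diff_offset left right → Spec_first_diff_offset left right (first_diff_offset left right)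

-- ===== LEMMAS AND PROOFS =====

-- longest common prefix length: proof-only characterisation both ports are compared against
def pvCPL : List Char → List Char → Nat
  | a :: as, b :: bs => if a = b then pvCPL as bs + 1 else 0
  | _, _ => 0

theorem pvCPL_le (l r : List Char) : pvCPL l r ≤ min l.length r.length := by
  induction l generalizing r with
  | nil => simp [pvCPL]
  | cons a as ih =>
    cases r with
    | nil => simp [pvCPL]
    | cons b bs =>
      simp only [pvCPL]
      split
      · have := ih bs; simp; omega
      · simp

theorem pvCPL_drop_succ (l r : List Char) (k : Nat)
    (hk : k < min l.length r.length) (heq : l[k]'(by omega) = r[k]'(by omega)) :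
    pvCPL (l.drop k) (r.drop k) = pvCPL (l.drop (k+1)) (r.drop (k+1)) + 1 := by
  have h1 : k < l.length := by omega
  have h2 : k < r.length := by omega
  rw [List.drop_eq_getElem_cons h1, List.drop_eq_getElem_cons h2]
  simp [pvCPL, heq]

theorem pvCPL_drop_zero (l r : List Char) (k : Nat)
    (hk : k < min l.length r.length) (hne : l[k]'(by omega) ≠ r[k]'(by omega)) :
    pvCPL (l.drop k) (r.drop k) = 0 := by
  have h1 : k < l.length := by omega
  have h2 : k < r.length := by omega
  rw [List.drop_eq_getElem_cons h1, List.drop_eq_getElem_cons h2]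
  simp [pvCPL, hne]

-- invariant of A's scan: starting at index k it finds k + pvCPL of the suffixes, if in range
theorem pvAScan_inv (l r : List Char) (k : Nat) (hk : k ≤ min l.length r.length) :
    pvAScan l r (PySem.List.pyRange (k : Int) (min l.length r.length : Int) 1) =
      (if k + pvCPL (l.drop k) (r.drop k) < min l.length r.length
       then some ((k + pvCPL (l.drop k) (r.drop k) : Nat) : Int) else none) := by
  by_cases h : k = min l.length r.length
  · rw [PySem.List.pyRange_one_eq_nil (by exact_mod_cast h.ge)]
    have := pvCPL_le (l.drop k) (r.drop k)
    simp [pvAScan]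
    omega
  · have hlt : k < min l.length r.length := by omega
    rw [PySem.List.pyRange_one_cons (by exact_mod_cast hlt)]
    have h1 : k < l.length := by omega
    have h2 : k < r.length := by omega
    simp only [pvAScan]
    rw [PySem.List.pyGet?_natCast, PySem.List.pyGet?_natCast]
    rw [List.getElem?_eq_getElem h1, List.getElem?_eq_getElem h2]
    by_cases hc : l[k] = r[k]
    · simp only [hc, ne_eq, not_true_eq_false, ite_false]
      have : ((k : Int) + 1) = ((k + 1 : Nat) : Int) := by push_cast; ring
      rw [this, pvAScan_inv l r (k+1) (by omega)]
      rw [pvCPL_drop_succ l r k hlt hc]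
      have harith : k + (pvCPL (l.drop (k+1)) (r.drop (k+1)) + 1)
          = k + 1 + pvCPL (l.drop (k+1)) (r.drop (k+1)) := by omega
      rw [harith]
    · have hz := pvCPL_drop_zero l r k hlt hc
      simp [hc, hz, hlt]
  termination_by min l.length r.length - k

-- slice equality is monotone: a prefix of length m agrees iff m ≤ pvCPL
theorem pvTake_eq_iff (l r : List Char) (m : Nat) (hm : m ≤ min l.length r.length) :
    (l.take m = r.take m) ↔ m ≤ pvCPL l r := by
  induction m generalizing l r with
  | zero => simp
  | succ k ih =>
    cases l with
    | nil => simp at hm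
    | cons a as =>
      cases r with
      | nil => simp at hm
      | cons b bs =>
        by_cases hab : a = b
        · subst hab
          have hih := ih as bs (by simp at hm ⊢; omega)
          simp only [List.take_succ_cons, List.cons.injEq, pvCPL, if_true, true_and, hih]
          omega
        · simp only [List.take_succ_cons, List.cons.injEq, pvCPL, if_neg hab]
          constructor
          · rintro ⟨h1, -⟩; exact absurd h1 hab
          · omega

-- B's binary search converges to pvCPL whenever it brackets it
theorem pvBSearch_eq (left right : String) (lo hi : Int) (hlo0 : 0 ≤ lo)
    (hhi : hi ≤ (min left.toList.length right.toList.length : Nat))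
    (hlo : lo ≤ (pvCPL left.toList right.toList : Nat))
    (hp : (pvCPL left.toList right.toList : Nat) ≤ hi) :
    pvBSearch left right lo hi = (pvCPL left.toList right.toList : Nat) := by
  rw [pvBSearch]
  by_cases h : lo < hi
  · simp only [dif_pos h]
    have hmb := pvMidBounds lo hi h
    set mid := PySem.Int.floordiv (lo + hi + 1) 2 with hmiddef
    have hmid0 : 0 ≤ mid := by omega
    have hslice : (PySem.Str.slice left none (some mid) = PySem.Str.slice right none (some mid))
        ↔ left.toList.take mid.toNat = right.toList.take mid.toNat := by
      rw [← String.toList_inj]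
      simp [PySem.List.slice_to _ hmid0]
    have hmle : mid.toNat ≤ min left.toList.length right.toList.length := by omega
    by_cases hq : PySem.Str.slice left none (some mid) = PySem.Str.slice right none (some mid)
    · have hmp : mid.toNat ≤ pvCPL left.toList right.toList :=
        (pvTake_eq_iff _ _ _ hmle).mp (hslice.mp hq)
      simp only [if_pos hq]
      exact pvBSearch_eq left right mid hi (by omega) hhi (by omega) hp
    · have hmp : ¬ mid.toNat ≤ pvCPL left.toList right.toList := by
        intro hc; exact hq (hslice.mpr ((pvTake_eq_iff _ _ _ hmle).mpr hc))
      simp only [if_neg hq]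
      exact pvBSearch_eq left right lo (mid - 1) hlo0 (by omega) hlo (by omega)
  · simp only [dif_neg h]
    omega
termination_by (hi - lo).toNat
decreasing_by
· have := pvMidBounds lo hi h; omega
· have := pvMidBounds lo hi h; omega

-- ===== VERDICT (by name: the statement is the Claim_ definition above) =====
theorem first_diff_offset_spec : Claim_equal_first_diff_offset := by
  intro left right _
  unfold Spec_first_diff_offset first_diff_offset first_diff_offset_alt
  set l := left.toList
  set r := right.toList
  have h0 : ((0 : Nat) : Int) = (0 : Int) := rfl
  have hscan := pvAScan_inv l r 0 (by omega)
  simp only [List.drop_zero, Nat.zero_add, h0] at hscan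
  simp only [hscan]
  have hle := pvCPL_le l r
  have hbs := pvBSearch_eq left right 0 (min l.length r.length : Nat)
      le_rfl le_rfl (by exact_mod_cast Int.natCast_nonneg _) (by exact_mod_cast hle)
  simp only [hbs]
  set n := pvCPL l r with hn
  by_cases hlt : n < min l.length r.length
  · simp only [if_pos hlt]
    have hne2 : ¬ ((n : Int) = (l.length : Int) ∧ l.length = r.length) := by
      rintro ⟨h1, h2⟩; omega
    rw [if_neg hne2]
  · simp only [if_neg hlt]
    have hmin : n = min l.length r.length := by omega
    by_cases heq : l.length = r.length
    · have : (n : Int) = (l.length : Int) ∧ l.length = r.length := by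
        constructor
        · exact_mod_cast by omega
        · exact heq
      simp [heq, this]
    · have hne : ¬ ((n : Int) = (l.length : Int) ∧ l.length = r.length) := by
        rintro ⟨h1, h2⟩; exact heq h2
      simp [heq]
      omega
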